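-- pv_equiv track=rewrite | github.com/salchaD-27/problemSolving_alsoDA | LeetCode/793_H_Preimage_Size_Of_Factoria_Zeroes_Function.py | preimageSizeFZF
-- ===== SOURCE A (Python) =====
-- def preimageSizeFZF(k: int) -> int:
--     def f(x):
--         res = 0
--         while x > 0:
--             x //= 5
--             res += x
--         return res
--     def leftBound(k):
--         lo, hi = 0, 5 * (k + 1)
--         while lo < hi:
--             mid = (lo + hi) // 2
--             if f(mid) < k: lo = mid + 1
--             else: hi = mid
--         return lo
--     def rightBound(k):
--         lo, hi = 0, 5 * (k + 1)
--         while lo < hi: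
--             mid = (lo + hi) // 2
--             if f(mid) <= k: lo = mid + 1
--             else: hi = mid
--         return lo
--     return rightBound(k) - leftBound(k)
-- ===== SOURCE B (Python) =====
-- def preimageSizeFZF(k: int) -> int:
--     # greedy digit decomposition: k has a (constant-size) preimage iff k is a sum
--     # of chain values g (g starts at one, next g is 5*g+1 -- the trailing-zero
--     # counts of factorials of powers of five) with digits at most four.
--     if k < 0:
--         return 0
--     g = 1
--     while 5 * g + 1 <= k:
--         g = 5 * g + 1
--     while g > 0:
--         if k // g > 4:
--             return 0
--         k %= g
--         g = (g - 1) // 5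
--     return 5
-- ===== Notes on version B (the rewrite author's own statement) =====
-- stated objective: alternative
-- what changed: B replaces A's two binary searches over f with a number-theoretic greedy: it decomposes k over the chain of values g, next g = 5*g+1 (the trailing-zero counts of factorials of powers of five), with digits at most four, returning the constant preimage size exactly when the decomposition succeeds; no call to f remains.
import Mathlib
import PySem

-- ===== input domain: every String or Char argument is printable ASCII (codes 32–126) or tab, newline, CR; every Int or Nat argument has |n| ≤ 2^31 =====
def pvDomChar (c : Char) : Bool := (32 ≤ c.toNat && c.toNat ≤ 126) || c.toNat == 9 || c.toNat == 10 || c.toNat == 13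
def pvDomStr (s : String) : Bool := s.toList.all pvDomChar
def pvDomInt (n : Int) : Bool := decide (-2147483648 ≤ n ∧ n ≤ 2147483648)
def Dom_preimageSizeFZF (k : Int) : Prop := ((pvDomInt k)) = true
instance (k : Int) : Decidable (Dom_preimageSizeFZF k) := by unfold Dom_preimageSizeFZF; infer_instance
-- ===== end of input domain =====

-- B replaces A's two binary searches over f with a greedy digit decomposition of k
-- over g_1 = 1, g_{i+1} = 5*g_i + 1 (no call to f at all); objective: alternative.
-- The Nat fuel arguments below are totality guards only: each bounds the number of
-- iterations of the corresponding Python `while` loop.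

-- ===== PORT A =====
-- inner helper f: `while x > 0: x //= 5; res += x`
def pvFGo : Nat → Int → Int
  | 0, _ => 0
  | n + 1, x =>
    if 0 < x then PySem.Int.floordiv x 5 + pvFGo n (PySem.Int.floordiv x 5) else 0

def pvF (x : Int) : Int := pvFGo x.toNat x

-- leftBound's loop: `while lo < hi: … if f(mid) < k …`
def pvLeftGo : Nat → Int → Int → Int → Int
  | 0, _, lo, _ => lo
  | n + 1, k, lo, hi =>
    if lo < hi then
      if pvF (PySem.Int.floordiv (lo + hi) 2) < k then
        pvLeftGo n k (PySem.Int.floordiv (lo + hi) 2 + 1) hi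
      else pvLeftGo n k lo (PySem.Int.floordiv (lo + hi) 2)
    else lo

-- rightBound's loop: `… if f(mid) <= k …`
def pvRightGo : Nat → Int → Int → Int → Int
  | 0, _, lo, _ => lo
  | n + 1, k, lo, hi =>
    if lo < hi then
      if pvF (PySem.Int.floordiv (lo + hi) 2) ≤ k then
        pvRightGo n k (PySem.Int.floordiv (lo + hi) 2 + 1) hi
      else pvRightGo n k lo (PySem.Int.floordiv (lo + hi) 2)
    else lo

def preimageSizeFZF (k : Int) : Int :=
  pvRightGo (5 * (k + 1)).toNat k 0 (5 * (k + 1)) -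
    pvLeftGo (5 * (k + 1)).toNat k 0 (5 * (k + 1))

-- ===== PORT B =====
-- Source B's first loop: `g = 1; while 5*g+1 <= k: g = 5*g+1`
def pvGrow : Nat → Int → Int → Int
  | 0, _, g => g
  | n + 1, k, g => if 5 * g + 1 ≤ k then pvGrow n k (5 * g + 1) else g

-- Source B's second loop: `while g > 0: if k//g > 4: return 0; k %= g; g = (g-1)//5`, then `return 5`
def pvShrink : Nat → Int → Int → Int
  | 0, _, _ => 5
  | n + 1, k, g =>
    if 0 < g then
      if 4 < PySem.Int.floordiv k g then 0
      else pvShrink n (PySem.Int.mod k g) (PySem.Int.floordiv (g - 1) 5)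
    else 5

def preimageSizeFZF_alt (k : Int) : Int :=
  if k < 0 then 0
  else
    let g := pvGrow k.toNat k 1
    pvShrink g.toNat k g

-- ===== PRECONDITION & SPEC =====
def Spec_preimageSizeFZF (k : Int) (out : Int) : Prop := out = preimageSizeFZF_alt k
instance (k : Int) (out : Int) : Decidable (Spec_preimageSizeFZF k out) := by unfold Spec_preimageSizeFZF; infer_instance

-- ===== CLAIM (what is proved, stated in full; the proofs are below) =====
def Claim_equal_preimageSizeFZF : Prop := ∀ (k : Int), Dom_preimageSizeFZF k → Spec_preimageSizeFZF k (preimageSizeFZF k)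

-- ===== LEMMAS AND PROOFS =====

theorem pvFGo_nonpos {x : Int} (h : ¬ 0 < x) : ∀ n, pvFGo n x = 0
  | 0 => rfl
  | n + 1 => by rw [pvFGo, if_neg h]

-- fuel irrelevance for f: any fuel ≥ x.toNat gives the same value
theorem pvFGo_congr : ∀ (n : Nat) {m : Nat} {x : Int}, x.toNat ≤ n → x.toNat ≤ m →
    pvFGo n x = pvFGo m x := by
  intro n
  induction n with
  | zero =>
    intro m x hn _
    rw [pvFGo_nonpos (by omega) 0, pvFGo_nonpos (by omega) m]
  | succ n ih =>
    intro m x hn hm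
    by_cases hx : 0 < x
    · obtain ⟨m', rfl⟩ : ∃ m', m = m' + 1 := ⟨m - 1, by omega⟩
      rw [pvFGo, if_pos hx, pvFGo, if_pos hx]
      have h5 := PySem.Int.floordiv_eq_ediv_of_pos (a := x) (b := 5) (by omega)
      have harg : (PySem.Int.floordiv x 5).toNat ≤ x.toNat - 1 := by rw [h5]; omega
      exact congrArg (PySem.Int.floordiv x 5 + ·) (ih (m := m') (by omega) (by omega))
    · rw [pvFGo_nonpos hx, pvFGo_nonpos hx]

theorem pvF_eq_pos {x : Int} (h : 0 < x) :
    pvF x = PySem.Int.floordiv x 5 + pvF (PySem.Int.floordiv x 5) := by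
  have h5 := PySem.Int.floordiv_eq_ediv_of_pos (a := x) (b := 5) (by omega)
  obtain ⟨t, ht⟩ : ∃ t, x.toNat = t + 1 := ⟨x.toNat - 1, by omega⟩
  show pvFGo x.toNat x = _ + pvFGo (PySem.Int.floordiv x 5).toNat _
  rw [ht, pvFGo, if_pos h, pvFGo_congr t (by rw [h5]; omega) (le_refl _)]

theorem pvF_eq_nonpos {x : Int} (h : ¬ 0 < x) : pvF x = 0 := by
  have : x.toNat = 0 := by omega
  show pvFGo x.toNat x = 0
  rw [this]
  rfl

theorem pvF_nonneg (x : Int) : 0 ≤ pvF x := by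
  suffices H : ∀ (n : Nat) (x : Int), x.toNat ≤ n → 0 ≤ pvF x from H x.toNat x (le_refl _)
  intro n
  induction n with
  | zero => intro x hx; rw [pvF_eq_nonpos (by omega)]
  | succ n ih =>
    intro x hx
    by_cases h : 0 < x
    · rw [pvF_eq_pos h]
      have h5 := PySem.Int.floordiv_eq_ediv_of_pos (a := x) (b := 5) (by omega)
      have := ih (PySem.Int.floordiv x 5) (by rw [h5]; omega)
      have : (0:Int) ≤ PySem.Int.floordiv x 5 := by rw [h5]; omega
      omega
    · rw [pvF_eq_nonpos h]

theorem pvF_mono : ∀ {x y : Int}, x ≤ y → pvF x ≤ pvF y := by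
  suffices H : ∀ (n : Nat) (x y : Int), y.toNat ≤ n → x ≤ y → pvF x ≤ pvF y by
    intro x y h; exact H y.toNat x y (le_refl _) h
  intro n
  induction n with
  | zero =>
    intro x y hy hxy
    rw [pvF_eq_nonpos (by omega : ¬ 0 < y), pvF_eq_nonpos (by omega : ¬ 0 < x)]
  | succ n ih =>
    intro x y hy hxy
    by_cases hx : 0 < x
    · rw [pvF_eq_pos hx, pvF_eq_pos (by omega : 0 < y)]
      have hx5 := PySem.Int.floordiv_eq_ediv_of_pos (a := x) (b := 5) (by omega)
      have hy5 := PySem.Int.floordiv_eq_ediv_of_pos (a := y) (b := 5) (by omega)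
      have hle : PySem.Int.floordiv x 5 ≤ PySem.Int.floordiv y 5 := by
        rw [hx5, hy5]; omega
      have := ih (PySem.Int.floordiv x 5) (PySem.Int.floordiv y 5) (by rw [hy5]; omega) hle
      have hxnn : (0:Int) ≤ PySem.Int.floordiv x 5 := by rw [hx5]; omega
      omega
    · rw [pvF_eq_nonpos hx]
      exact pvF_nonneg y

-- f is constant on each block [5q, 5q+4] (q ≥ 0), with value q + f q
theorem pvF_block : ∀ {q r : Int}, 0 ≤ q → 0 ≤ r → r < 5 →
    pvF (5 * q + r) = q + pvF q := by
  intro q r hq hr0 hr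
  by_cases h : 0 < 5 * q + r
  · rw [pvF_eq_pos h]
    have hfd : PySem.Int.floordiv (5 * q + r) 5 = q := by
      rw [PySem.Int.floordiv_eq_ediv_of_pos (by omega)]; omega
    rw [hfd]
  · have hq0 : q = 0 := by omega
    have hr0' : r = 0 := by omega
    subst hq0; subst hr0'
    norm_num [pvF_eq_nonpos]

-- pvF x = F (x/5) where F m = m + pvF m
theorem pvF_as_F {x : Int} (hx : 0 ≤ x) : pvF x = x / 5 + pvF (x / 5) := by
  conv_lhs => rw [show x = 5 * (x / 5) + x % 5 by omega]
  exact pvF_block (by omega) (by omega) (by omega)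

theorem pvF_small {m : Int} (h0 : 0 ≤ m) (h5 : m < 5) : pvF m = 0 := by
  have := pvF_block (q := 0) (r := m) le_rfl h0 h5
  simpa [pvF_eq_nonpos] using this

theorem pvF_five_mul_ge {m : Int} (hm : 0 ≤ m) : m ≤ pvF (5 * m) := by
  have h1 : pvF (5 * m + 0) = m + pvF m := pvF_block hm (by omega) (by omega)
  have h0 := pvF_nonneg m
  simp only [add_zero] at h1
  omega

-- pvLeftGo (with enough fuel) computes the least x ≥ lo with f x ≥ k
theorem leftGo_inv (k : Int) : ∀ (n : Nat) (lo hi : Int), (hi - lo).toNat ≤ n → 0 ≤ lo →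
    lo ≤ hi → (∀ x, 0 ≤ x → x < lo → pvF x < k) → k ≤ pvF hi →
    lo ≤ pvLeftGo n k lo hi ∧
      (∀ x, 0 ≤ x → x < pvLeftGo n k lo hi → pvF x < k) ∧ k ≤ pvF (pvLeftGo n k lo hi) := by
  intro n
  induction n with
  | zero =>
    intro lo hi hn hlo hlh hbelow hhi
    exact ⟨le_refl _, hbelow, by rwa [show lo = hi from by omega]⟩
  | succ n ih =>
    intro lo hi hn hlo hlh hbelow hhi
    by_cases h : lo < hi
    · have hmid := PySem.Int.floordiv_eq_ediv_of_pos (a := lo + hi) (b := 2) (by omega)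
      set mid := PySem.Int.floordiv (lo + hi) 2 with hmiddef
      have hb : lo ≤ mid ∧ mid < hi := by rw [hmid]; omega
      rw [pvLeftGo, if_pos h]
      simp only [← hmiddef]
      by_cases hp : pvF mid < k
      · rw [if_pos hp]
        have := ih (mid + 1) hi (by omega) (by omega) (by omega)
          (fun x hx hxm => lt_of_le_of_lt (pvF_mono (by omega : x ≤ mid)) hp) hhi
        exact ⟨by omega, this.2.1, this.2.2⟩
      · rw [if_neg hp]
        exact ih lo mid (by omega) hlo (by omega) hbelow (by omega : k ≤ pvF mid)
    · rw [pvLeftGo, if_neg h]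
      exact ⟨le_refl _, hbelow, by rwa [show lo = hi from by omega]⟩

-- pvRightGo (with enough fuel) computes the least x ≥ lo with f x > k
theorem rightGo_inv (k : Int) : ∀ (n : Nat) (lo hi : Int), (hi - lo).toNat ≤ n → 0 ≤ lo →
    lo ≤ hi → (∀ x, 0 ≤ x → x < lo → pvF x ≤ k) → k < pvF hi →
    lo ≤ pvRightGo n k lo hi ∧
      (∀ x, 0 ≤ x → x < pvRightGo n k lo hi → pvF x ≤ k) ∧ k < pvF (pvRightGo n k lo hi) := by
  intro n
  induction n with
  | zero =>
    intro lo hi hn hlo hlh hbelow hhi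
    exact ⟨le_refl _, hbelow, by rwa [show lo = hi from by omega]⟩
  | succ n ih =>
    intro lo hi hn hlo hlh hbelow hhi
    by_cases h : lo < hi
    · have hmid := PySem.Int.floordiv_eq_ediv_of_pos (a := lo + hi) (b := 2) (by omega)
      set mid := PySem.Int.floordiv (lo + hi) 2 with hmiddef
      have hb : lo ≤ mid ∧ mid < hi := by rw [hmid]; omega
      rw [pvRightGo, if_pos h]
      simp only [← hmiddef]
      by_cases hp : pvF mid ≤ k
      · rw [if_pos hp]
        have := ih (mid + 1) hi (by omega) (by omega) (by omega)
          (fun x hx hxm => le_trans (pvF_mono (by omega : x ≤ mid)) hp) hhi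
        exact ⟨by omega, this.2.1, this.2.2⟩
      · rw [if_neg hp]
        exact ih lo mid (by omega) hlo (by omega) hbelow (by omega : k < pvF mid)
    · rw [pvRightGo, if_neg h]
      exact ⟨le_refl _, hbelow, by rwa [show lo = hi from by omega]⟩

-- A's value, characterized by attainability of k as a value of f on multiples of 5:
-- A k = 5 if ∃ m ≥ 0 with m + f(m) = f(5m) = k, else 0   (for k ≥ 0)
theorem pvF_step5 {x : Int} (hx : 0 ≤ x) : pvF x + 1 ≤ pvF (x + 5) := by
  have h1 : pvF x = x / 5 + pvF (x / 5) := pvF_as_F hx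
  have h2 : pvF (x + 5) = (x / 5 + 1) + pvF (x / 5 + 1) := by
    have : x + 5 = 5 * (x / 5 + 1) + x % 5 := by omega
    rw [this, pvF_block (by omega) (by omega) (by omega)]
  have h3 : pvF (x / 5) ≤ pvF (x / 5 + 1) := pvF_mono (by omega)
  omega

theorem A_attain {k : Int} (hk : 0 ≤ k) (m : Int) (hm : 0 ≤ m) (hF : m + pvF m = k) :
    preimageSizeFZF k = 5 := by
  have hfhi : k + 1 ≤ pvF (5 * (k + 1)) := pvF_five_mul_ge (by omega)
  obtain ⟨hL0, hLbelow, hLge⟩ :=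
    leftGo_inv k (5 * (k + 1)).toNat 0 (5 * (k + 1)) (by omega) le_rfl (by omega)
      (fun x hx hx0 => absurd hx0 (by omega)) (by omega)
  obtain ⟨hR0, hRbelow, hRgt⟩ :=
    rightGo_inv k (5 * (k + 1)).toNat 0 (5 * (k + 1)) (by omega) le_rfl (by omega)
      (fun x hx hx0 => absurd hx0 (by omega)) (by omega)
  set L := pvLeftGo (5 * (k + 1)).toNat k 0 (5 * (k + 1)) with hLdef
  set R := pvRightGo (5 * (k + 1)).toNat k 0 (5 * (k + 1)) with hRdef
  -- f(5m) = k, so L ≤ 5m and f(L) = k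
  have h5m : pvF (5 * m) = k := by
    have := pvF_block (q := m) (r := 0) hm le_rfl (by omega)
    simp only [add_zero] at this; omega
  have hLle : L ≤ 5 * m := by
    by_contra h
    have := hLbelow (5 * m) (by omega) (by omega)
    omega
  have hfL : pvF L = k := le_antisymm (h5m ▸ pvF_mono hLle) hLge
  -- L is a multiple of 5
  have hq5 : L = 5 * (L / 5) := by
    by_contra hne
    have hLv : pvF L = L / 5 + pvF (L / 5) := pvF_as_F hL0
    have h5q : pvF (5 * (L / 5) + 0) = L / 5 + pvF (L / 5) :=
      pvF_block (by omega) (by omega) (by omega)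
    simp only [add_zero] at h5q
    have := hLbelow (5 * (L / 5)) (by omega) (by omega)
    omega
  have hLval : pvF L = L / 5 + pvF (L / 5) := pvF_as_F hL0
  -- every x in [0, L+5) has f x ≤ k
  have hcover : ∀ x, 0 ≤ x → x < L + 5 → pvF x ≤ k := by
    intro x hx hxL
    by_cases hxL' : x < L
    · exact le_of_lt (hLbelow x hx hxL')
    · have hxv : pvF x = L / 5 + pvF (L / 5) := by
        conv_lhs => rw [show x = 5 * (L / 5) + (x - L) by omega]
        exact pvF_block (by omega) (by omega) (by omega)
      omega
  have hstep : k + 1 ≤ pvF (L + 5) := by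
    have := pvF_step5 (x := L) hL0
    omega
  have h1 : L + 5 ≤ R := by
    by_contra h
    push Not at h
    exact absurd (hcover R hR0 (by omega)) (by omega)
  have h2 : R ≤ L + 5 := by
    by_contra h
    push Not at h
    have := hRbelow (L + 5) (by omega) (by omega)
    omega
  show R - L = 5
  omega

theorem A_unattain {k : Int} (hk : 0 ≤ k)
    (h : ∀ m, 0 ≤ m → m + pvF m ≠ k) : preimageSizeFZF k = 0 := by
  have hfhi : k + 1 ≤ pvF (5 * (k + 1)) := pvF_five_mul_ge (by omega)
  obtain ⟨hL0, hLbelow, hLge⟩ :=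
    leftGo_inv k (5 * (k + 1)).toNat 0 (5 * (k + 1)) (by omega) le_rfl (by omega)
      (fun x hx hx0 => absurd hx0 (by omega)) (by omega)
  obtain ⟨hR0, hRbelow, hRgt⟩ :=
    rightGo_inv k (5 * (k + 1)).toNat 0 (5 * (k + 1)) (by omega) le_rfl (by omega)
      (fun x hx hx0 => absurd hx0 (by omega)) (by omega)
  set L := pvLeftGo (5 * (k + 1)).toNat k 0 (5 * (k + 1)) with hLdef
  set R := pvRightGo (5 * (k + 1)).toNat k 0 (5 * (k + 1)) with hRdef
  have hfL : pvF L ≠ k := by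
    intro heq
    exact h (L / 5) (by omega) (by rw [← pvF_as_F hL0]; exact heq)
  have h1 : L ≤ R := by
    by_contra hc
    push Not at hc
    have := hLbelow R hR0 hc
    omega
  have h2 : R ≤ L := by
    by_contra hc
    push Not at hc
    have := hRbelow L hL0 hc
    omega
  show R - L = 0
  omega

-- the chain g_1 = 1, g_{p+1} = 5 g_p + 1, with its length
inductive pvRep : Nat → Int → Prop
  | one : pvRep 1 1
  | step {p g} : pvRep p g → pvRep (p + 1) (5 * g + 1)

theorem pvRep_pos {p : Nat} {g : Int} (h : pvRep p g) : 1 ≤ g := by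
  induction h with
  | one => omega
  | step _ ih => omega

theorem pvRep_len_le {p : Nat} {g : Int} (h : pvRep p g) : (p : Int) ≤ g := by
  induction h with
  | one => omega
  | step _ ih => push_cast; push_cast at ih; omega

-- digit lemma: pvF (e*(4g+1) + m') = e*g + pvF m' for digits e ≤ 4, m' < 4g+1
theorem pvF_digit {p : Nat} {g : Int} (hrep : pvRep p g) :
    ∀ e m' : Int, 0 ≤ e → e ≤ 4 → 0 ≤ m' → m' < 4 * g + 1 →
      pvF (e * (4 * g + 1) + m') = e * g + pvF m' := by
  induction hrep with
  | one =>
    intro e m' he0 he4 hm0 hm5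
    have h1 : e * (4 * 1 + 1) + m' = 5 * e + m' := by ring
    rw [h1, pvF_block he0 hm0 (by omega), pvF_small he0 (by omega),
      pvF_small hm0 (by omega)]
    omega
  | @step p g hrep ih =>
    intro e m' he0 he4 hm0 hlt
    have hg := pvRep_pos hrep
    have ha : 0 ≤ e * (4 * g + 1) := mul_nonneg he0 (by omega)
    have hb : 0 ≤ m' / 5 := Int.ediv_nonneg hm0 (by omega)
    have hq0 : 0 ≤ e * (4 * g + 1) + m' / 5 := by omega
    have harg : e * (4 * (5 * g + 1) + 1) + m' =
        5 * (e * (4 * g + 1) + m' / 5) + m' % 5 := by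
      have h := Int.mul_ediv_add_emod m' 5
      linear_combination -h
    rw [harg, pvF_block hq0 (by omega) (by omega),
      ih e (m' / 5) he0 he4 (by omega) (by omega), pvF_as_F hm0]
    ring

-- base-chain digit decomposition of m < 5*(4g+1)
theorem pvDecomp {g : Int} (hg : 1 ≤ g) (m : Int) (h0 : 0 ≤ m) (hlt : m < 5 * (4 * g + 1)) :
    ∃ e r, 0 ≤ e ∧ e ≤ 4 ∧ 0 ≤ r ∧ r < 4 * g + 1 ∧ m = e * (4 * g + 1) + r := by
  have hG : (0:Int) < 4 * g + 1 := by omega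
  have hdem := Int.mul_ediv_add_emod m (4 * g + 1)
  have hr0 := Int.emod_nonneg m (by omega : (4 * g + 1) ≠ 0)
  have hrlt := Int.emod_lt_of_pos m hG
  have he0 : 0 ≤ m / (4 * g + 1) := Int.ediv_nonneg h0 (by omega)
  have he4 : m / (4 * g + 1) < 5 := (Int.ediv_lt_iff_lt_mul hG).mpr (by omega)
  refine ⟨m / (4 * g + 1), m % (4 * g + 1), he0, by omega, hr0, hrlt, ?_⟩
  rw [Int.mul_comm (4 * g + 1)] at hdem
  omega

-- strict bound: m < 4g+1 → m + pvF m ≤ 5g - p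
theorem pvF_max {p : Nat} {g : Int} (hrep : pvRep p g) :
    ∀ m : Int, 0 ≤ m → m < 4 * g + 1 → m + pvF m ≤ 5 * g - p := by
  induction hrep with
  | one =>
    intro m hm0 hm5
    rw [pvF_small hm0 (by omega)]
    push_cast
    omega
  | @step p g hrepg ih =>
    intro m hm0 hlt
    have hg := pvRep_pos hrepg
    obtain ⟨e, r, he0, he4, hr0, hrlt, rfl⟩ :=
      pvDecomp hg m hm0 (by omega)
    rw [pvF_digit hrepg e r he0 he4 hr0 hrlt]
    have hih := ih r hr0 hrlt
    have hpg := pvRep_len_le hrepg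
    push_cast
    push_cast at hpg
    interval_cases e <;> omega

-- correctness of Source B's greedy loop
theorem pvShrink_zero : ∀ (n : Nat) (k : Int), pvShrink n k 0 = 5
  | 0, _ => rfl
  | n + 1, k => by rw [pvShrink, if_neg (by omega)]

theorem shrink_spec {p : Nat} {g : Int} (hrep : pvRep p g) :
    ∀ (n : Nat) (k : Int), p ≤ n → 0 ≤ k → k ≤ 5 * g →
      ((∃ m, 0 ≤ m ∧ m < 4 * g + 1 ∧ m + pvF m = k) → pvShrink n k g = 5) ∧
      ((∀ m, 0 ≤ m → m < 4 * g + 1 → m + pvF m ≠ k) → pvShrink n k g = 0) := by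
  induction hrep with
  | one =>
    intro n k hn hk0 hk5
    obtain ⟨n', rfl⟩ : ∃ n', n = n' + 1 := ⟨n - 1, by omega⟩
    rw [pvShrink, if_pos (by omega : (0:Int) < 1)]
    rw [show PySem.Int.floordiv k 1 = k by
      rw [PySem.Int.floordiv_eq_ediv_of_pos (by omega)]; omega]
    by_cases hk4 : 4 < k
    · rw [if_pos hk4]
      constructor
      · rintro ⟨m, hm0, hm5, hF⟩
        rw [pvF_small hm0 (by omega)] at hF
        omega
      · intro _; rfl
    · rw [if_neg hk4]
      rw [show PySem.Int.mod k 1 = 0 by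
        rw [PySem.Int.mod_eq_emod_of_pos (by omega)]; omega]
      rw [show PySem.Int.floordiv (1 - 1) 5 = 0 by
        rw [PySem.Int.floordiv_eq_ediv_of_pos (by omega)]; decide]
      rw [pvShrink_zero]
      constructor
      · intro _; rfl
      · intro hno
        exact absurd (by rw [pvF_small hk0 (by omega)]; omega)
          (hno k hk0 (by omega))
  | @step p g hrepg ih =>
    intro n k hn hk0 hk5
    have hg := pvRep_pos hrepg
    obtain ⟨n', rfl⟩ : ∃ n', n = n' + 1 := ⟨n - 1, by omega⟩
    rw [pvShrink, if_pos (by omega : (0:Int) < 5 * g + 1)]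
    have hfd : PySem.Int.floordiv k (5 * g + 1) = k / (5 * g + 1) :=
      PySem.Int.floordiv_eq_ediv_of_pos (by omega)
    have hdem := Int.mul_ediv_add_emod k (5 * g + 1)
    have hr0 := Int.emod_nonneg k (by omega : (5 * g + 1) ≠ 0)
    have hrlt := Int.emod_lt_of_pos k (by omega : (0:Int) < 5 * g + 1)
    have hd0 : 0 ≤ k / (5 * g + 1) := Int.ediv_nonneg hk0 (by omega)
    have hd6 : k / (5 * g + 1) < 6 :=
      (Int.ediv_lt_iff_lt_mul (by omega)).mpr (by omega)
    by_cases hd4 : 4 < PySem.Int.floordiv k (5 * g + 1)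
    · rw [if_pos hd4]
      rw [hfd] at hd4
      -- here k = 5*(5g+1), unattainable: every m < 4(5g+1)+1 has m + f m ≤ 5(5g+1)-(p+1)
      have hk : 5 * (5 * g + 1) ≤ k := by
        by_contra hc
        have h5 : k / (5 * g + 1) < 5 :=
          (Int.ediv_lt_iff_lt_mul (by omega)).mpr (by omega)
        omega
      constructor
      · rintro ⟨m, hm0, hmlt, hF⟩
        have := pvF_max (pvRep.step hrepg) m hm0 hmlt
        omega
      · intro _; rfl
    · rw [if_neg hd4]
      rw [hfd] at hd4
      have hmod : PySem.Int.mod k (5 * g + 1) = k % (5 * g + 1) :=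
        PySem.Int.mod_eq_emod_of_pos (by omega)
      have hnext : PySem.Int.floordiv (5 * g + 1 - 1) 5 = g := by
        rw [PySem.Int.floordiv_eq_ediv_of_pos (by omega)]
        rw [show 5 * g + 1 - 1 = 5 * g by ring]
        exact Int.mul_ediv_cancel_left g (by omega)
      rw [hmod, hnext]
      have hih := ih n' (k % (5 * g + 1)) (by omega) hr0 (by omega)
      -- k = d*(5g+1) + k' with 0 ≤ d ≤ 4
      have hkey : k = k / (5 * g + 1) * (5 * g + 1) + k % (5 * g + 1) := by
        rw [Int.mul_comm (5 * g + 1)] at hdem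
        omega
      constructor
      · rintro ⟨m, hm0, hmlt, hF⟩
        obtain ⟨e, r, he0, he4, hrr0, hrrlt, rfl⟩ :=
          pvDecomp hg m hm0 (by omega)
        rw [pvF_digit hrepg e r he0 he4 hrr0 hrrlt] at hF
        have hFr0 : 0 ≤ r + pvF r := by have := pvF_nonneg r; omega
        have hFrlt : r + pvF r < 5 * g + 1 := by
          have := pvF_max hrepg r hrr0 hrrlt
          omega
        -- uniqueness of the decomposition: e = k / (5g+1) and r + pvF r = k % (5g+1)
        have heq : r + pvF r = k % (5 * g + 1) := by
          have hd4' : k / (5 * g + 1) ≤ 4 := by omega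
          set d := k / (5 * g + 1) with hddef
          interval_cases e <;> interval_cases d <;> omega
        exact hih.1 ⟨r, hrr0, hrrlt, heq⟩
      · intro hno
        apply hih.2
        intro r hrr0 hrrlt heq
        have hd4' : k / (5 * g + 1) ≤ 4 := by omega
        refine hno (k / (5 * g + 1) * (4 * g + 1) + r) ?_ ?_ ?_
        · have := mul_nonneg hd0 (show (0:Int) ≤ 4 * g + 1 by omega)
          omega
        · set d := k / (5 * g + 1) with hddef
          interval_cases d <;> omega
        · rw [pvF_digit hrepg (k / (5 * g + 1)) r hd0 hd4' hrr0 hrrlt]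
          set d := k / (5 * g + 1) with hddef
          interval_cases d <;> omega

-- Source B's first loop lands on a chain element g with k ≤ 5g
theorem grow_ok : ∀ (n : Nat) (k g : Int) (p : Nat), pvRep p g → k ≤ g + n →
    ∃ p', pvRep p' (pvGrow n k g) ∧ k ≤ 5 * pvGrow n k g := by
  intro n
  induction n with
  | zero =>
    intro k g p hrep hk
    have := pvRep_pos hrep
    exact ⟨p, hrep, by simpa [pvGrow] using by omega⟩
  | succ n ih =>
    intro k g p hrep hk
    have hg := pvRep_pos hrep
    rw [pvGrow]
    by_cases h : 5 * g + 1 ≤ k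
    · rw [if_pos h]
      exact ih k (5 * g + 1) (p + 1) (pvRep.step hrep) (by push_cast at hk ⊢; omega)
    · rw [if_neg h]
      exact ⟨p, hrep, by omega⟩

theorem main_eq (k : Int) : preimageSizeFZF k = preimageSizeFZF_alt k := by
  by_cases hk : k < 0
  · -- hi = 5*(k+1) ≤ 0, both of A's loops exit at once; B returns 0 by its guard
    have hnil : (5 * (k + 1)).toNat = 0 := by omega
    rw [preimageSizeFZF, preimageSizeFZF_alt, if_pos hk, hnil]
    rfl
  · rw [preimageSizeFZF_alt, if_neg hk]
    obtain ⟨p, hrep, hk5⟩ :=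
      grow_ok k.toNat k 1 1 pvRep.one (by omega)
    set g := pvGrow k.toNat k 1 with hgdef
    have hg := pvRep_pos hrep
    have hfuel : p ≤ g.toNat := by
      have := pvRep_len_le hrep
      omega
    have hshrink := shrink_spec hrep g.toNat k hfuel (by omega) hk5
    by_cases hatt : ∃ m, 0 ≤ m ∧ m + pvF m = k
    · obtain ⟨m, hm0, hF⟩ := hatt
      have hmlt : m < 4 * g + 1 := by
        by_contra hc
        push Not at hc
        have h1 : pvF (4 * g + 1) = g := by
          have := pvF_digit hrep 1 0 (by omega) (by omega) (by omega) (by omega)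
          simpa [pvF_eq_nonpos] using this
        have h2 : pvF (4 * g + 1) ≤ pvF m := pvF_mono hc
        omega
      rw [hshrink.1 ⟨m, hm0, hmlt, hF⟩]
      exact A_attain (by omega) m hm0 hF
    · push Not at hatt
      rw [hshrink.2 (fun m h0 _ => hatt m h0)]
      exact A_unattain (by omega) (fun m h0 => hatt m h0)

-- ===== VERDICT (by name: the statement is the Claim_ definition above) =====
theorem preimageSizeFZF_spec : Claim_equal_preimageSizeFZF := by
  intro k _
  show preimageSizeFZF k = preimageSizeFZF_alt k
  exact main_eq k
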